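-- pv_equiv track=rewrite | github.com/BrianOrozco29/PythonAssignments | BrianOrozco_Final2013.py | vowelContent
-- ===== SOURCE A (Python) =====
-- def vowelContent(wordList):
--     d = {'mostly vowels': [], 'half vowels': [], 'mostly consonants': []}
--     vowels = 'aeiou'
--
--     for i in wordList:
--         vowCount = 0
--         for j in vowels:
--             if j in i:
--                 vowCount += i.count(j)
--         if vowCount > len(i) / 2:
--             d['mostly vowels'].append(i)
--         elif vowCount == len(i) / 2:
--             d['half vowels'].append(i)
--         elif vowCount < len(i) / 2:
--             d['mostly consonants'].append(i)
--
--     return d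
-- ===== SOURCE B (Python) =====
-- def vowelContent(wordList):
--     vowels = frozenset('aeiou')
--
--     def category(word):
--         # one pass over the characters instead of five .count scans;
--         # 2*v > len(word) is exactly vowCount > len(word)/2 (len/2 is an exact float)
--         v = sum(1 for c in word if c in vowels)
--         if 2 * v > len(word):
--             return 'mostly vowels'
--         if 2 * v == len(word):
--             return 'half vowels'
--         return 'mostly consonants'
--
--     return {k: [w for w in wordList if category(w) == k]
--             for k in ('mostly vowels', 'half vowels', 'mostly consonants')}
-- ===== Notes on version B (the rewrite author's own statement) =====
-- stated objective: idiomatic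
-- what changed: Classify each word with a single-pass vowel count (sum over characters in a vowel set) and build the result as a dict comprehension of per-category filters, instead of five word.count scans per word and in-place appends to a mutable dict.
import Mathlib
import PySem

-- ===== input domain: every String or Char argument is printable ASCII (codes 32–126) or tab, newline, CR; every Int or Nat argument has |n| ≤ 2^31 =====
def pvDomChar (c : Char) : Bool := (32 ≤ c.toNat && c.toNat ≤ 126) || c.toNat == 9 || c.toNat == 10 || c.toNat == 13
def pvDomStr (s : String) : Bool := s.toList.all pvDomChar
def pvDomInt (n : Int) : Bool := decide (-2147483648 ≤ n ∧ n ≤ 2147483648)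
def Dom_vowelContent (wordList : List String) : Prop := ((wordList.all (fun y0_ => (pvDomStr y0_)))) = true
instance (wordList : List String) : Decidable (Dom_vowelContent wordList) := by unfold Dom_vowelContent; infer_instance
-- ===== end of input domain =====

-- B replaces A's five per-word .count scans by a single pass over the word's characters and
-- builds the result dict as per-category comprehensions (idiomatic; same exact output).

-- ===== PORT A =====
-- vowCount > len(i)/2 is ported as 2*vowCount > len i: exact, since len(i)/2 is an exact
-- binary float and comparison of a Python int with it is exact.
-- 'j in i' / 'i.count(j)' for a single character j are char membership / char count on i.
def vowelContent (wordList : List String) : List (String × List String) :=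
  let vowels := "aeiou".toList
  let d := wordList.foldl
    (fun (d : List String × List String × List String) i =>
      let vowCount : Nat := vowels.foldl
        (fun acc j => if j ∈ i.toList then acc + i.toList.count j else acc) 0
      if 2 * vowCount > i.toList.length then (d.1 ++ [i], d.2.1, d.2.2)
      else if 2 * vowCount = i.toList.length then (d.1, d.2.1 ++ [i], d.2.2)
      else (d.1, d.2.1, d.2.2 ++ [i]))  -- final elif: vowCount < len/2 always holds here
    ([], [], [])
  [("mostly vowels", d.1), ("half vowels", d.2.1), ("mostly consonants", d.2.2)]

-- ===== PORT B =====
def pvVowels : List Char := ['a', 'e', 'i', 'o', 'u']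

-- B's v = sum(1 for c in word if c in vowels): one pass over the characters
def pvVowCountB (w : String) : Nat := w.toList.countP (fun c => c ∈ pvVowels)

-- B's category(word)
def pvCategory (w : String) : String :=
  if 2 * pvVowCountB w > w.toList.length then "mostly vowels"
  else if 2 * pvVowCountB w = w.toList.length then "half vowels"
  else "mostly consonants"

def vowelContent_alt (wordList : List String) : List (String × List String) :=
  ["mostly vowels", "half vowels", "mostly consonants"].map
    (fun k => (k, wordList.filter (fun w => pvCategory w == k)))

-- ===== PRECONDITION & SPEC =====
def Spec_vowelContent (wordList : List String) (out : List (String × List String)) : Prop := out = vowelContent_alt wordList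
instance (wordList : List String) (out : List (String × List String)) : Decidable (Spec_vowelContent wordList out) := by unfold Spec_vowelContent; infer_instance

-- ===== CLAIM (what is proved, stated in full; the proofs are below) =====
def Claim_equal_vowelContent : Prop := ∀ (wordList : List String), Dom_vowelContent wordList → Spec_vowelContent wordList (vowelContent wordList)

-- ===== LEMMAS AND PROOFS =====

-- A's summed per-vowel counts equal B's single-pass countP
set_option maxHeartbeats 1000000 in
theorem countA_eq (w : List Char) :
    "aeiou".toList.foldl (fun acc j => if j ∈ w then acc + w.count j else acc) 0
      = w.countP (fun c => c ∈ pvVowels) := by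
  have h : ∀ (j : Char) (acc : Nat),
      (if j ∈ w then acc + w.count j else acc) = acc + w.count j := by
    intro j acc
    by_cases hj : j ∈ w
    · simp [hj]
    · simp [hj, List.count_eq_zero_of_not_mem hj]
  have step : "aeiou".toList.foldl (fun acc j => if j ∈ w then acc + w.count j else acc) 0
      = w.count 'a' + w.count 'e' + w.count 'i' + w.count 'o' + w.count 'u' := by
    show List.foldl _ 0 ['a','e','i','o','u'] = _
    simp only [List.foldl_cons, List.foldl_nil, h]
    omega
  rw [step]
  clear h step
  induction w with
  | nil => simp
  | cons c t ih =>
    simp only [List.countP_cons, List.count_cons]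
    generalize hG : List.countP (fun c => decide (c ∈ pvVowels)) t = G at ih ⊢
    by_cases hv : c ∈ pvVowels
    · simp only [pvVowels, List.mem_cons, List.not_mem_nil, or_false] at hv
      rcases hv with rfl | rfl | rfl | rfl | rfl <;> simp [pvVowels] <;> omega
    · have hd : decide (c ∈ pvVowels) = false := by simpa using hv
      have hne : ∀ v, v ∈ pvVowels → (c == v) = false := fun v hvm =>
        beq_eq_false_iff_ne.mpr (by rintro rfl; exact hv hvm)
      rw [hd, hne 'a' (by simp [pvVowels]), hne 'e' (by simp [pvVowels]),
        hne 'i' (by simp [pvVowels]), hne 'o' (by simp [pvVowels]),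
        hne 'u' (by simp [pvVowels])]
      simp
      omega

def pvC1 (w : String) : Bool := 2 * pvVowCountB w > w.toList.length
def pvC2 (w : String) : Bool := !pvC1 w && (2 * pvVowCountB w == w.toList.length)
def pvC3 (w : String) : Bool := !pvC1 w && !(2 * pvVowCountB w == w.toList.length)

theorem foldl_step (l : List String) (acc : List String × List String × List String) :
    l.foldl
      (fun (d : List String × List String × List String) i =>
        let vowCount : Nat := "aeiou".toList.foldl
          (fun acc j => if j ∈ i.toList then acc + i.toList.count j else acc) 0
        if 2 * vowCount > i.toList.length then (d.1 ++ [i], d.2.1, d.2.2)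
        else if 2 * vowCount = i.toList.length then (d.1, d.2.1 ++ [i], d.2.2)
        else (d.1, d.2.1, d.2.2 ++ [i])) acc
      = (acc.1 ++ l.filter pvC1, acc.2.1 ++ l.filter pvC2, acc.2.2 ++ l.filter pvC3) := by
  induction l generalizing acc with
  | nil => simp
  | cons i t ih =>
    rw [List.foldl_cons, ih]
    simp only [countA_eq]
    split_ifs with h1 h2
    · have c1 : pvC1 i = true := by simpa [pvC1, pvVowCountB] using h1
      have c2 : pvC2 i = false := by simp [pvC2, c1]
      have c3 : pvC3 i = false := by simp [pvC3, c1]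
      simp [c1, c2, c3]
    · have c1 : pvC1 i = false := by simpa [pvC1, pvVowCountB] using h1
      have c2 : pvC2 i = true := by
        simp only [pvC2, c1, Bool.not_false, Bool.true_and, pvVowCountB]
        exact beq_iff_eq.mpr h2
      have c3 : pvC3 i = false := by simp [pvC3, pvC2, c1] at c2 ⊢; omega
      simp [c1, c2, c3]
    · have c1 : pvC1 i = false := by simpa [pvC1, pvVowCountB] using h1
      have c2 : pvC2 i = false := by
        simp only [pvC2, c1, Bool.not_false, Bool.true_and, pvVowCountB]
        simpa using h2
      have c3 : pvC3 i = true := by simp [pvC3, pvC2, c1] at c2 ⊢; omega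
      simp [c1, c2, c3]

theorem cat_c1 (w : String) : (pvCategory w == "mostly vowels") = pvC1 w := by
  unfold pvCategory pvC1
  split_ifs with h1 h2 <;> simp_all

theorem cat_c2 (w : String) : (pvCategory w == "half vowels") = pvC2 w := by
  unfold pvCategory pvC2 pvC1
  split_ifs with h1 h2 <;> simp_all

theorem cat_c3 (w : String) : (pvCategory w == "mostly consonants") = pvC3 w := by
  unfold pvCategory pvC3 pvC1
  split_ifs with h1 h2 <;> simp_all

-- ===== VERDICT (by name: the statement is the Claim_ definition above) =====
theorem vowelContent_spec : Claim_equal_vowelContent := by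
  intro wordList _
  unfold Spec_vowelContent
  simp only [vowelContent, vowelContent_alt, foldl_step, List.map_cons, List.map_nil,
    cat_c1, cat_c2, cat_c3]
  simp
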